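-- pv_equiv track=rewrite | github.com/N4171k/pratyaksh | backend/app/utils/email_parser.py | deduplicate_services
-- ===== SOURCE A (Python) =====
-- from typing import Optional, List, Tuple
--
-- def deduplicate_services(
--     services: List[Tuple[str, str, str]]
-- ) -> List[Tuple[str, str, str]]:
--     """
--     Deduplicate services by domain, keeping the earliest date.
--
--     Args:
--         services: List of (domain, subject, date) tuples
--
--     Returns:
--         Deduplicated list with earliest dates
--     """
--     domain_map = {}
--
--     for domain, subject, date in services:
--         if domain not in domain_map:
--             domain_map[domain] = (domain, subject, date)
--         else:
--             # Keep the earlier date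
--             existing_date = domain_map[domain][2]
--             try:
--                 if date < existing_date:
--                     domain_map[domain] = (domain, subject, date)
--             except:
--                 pass  # Keep existing if date comparison fails
--
--     return list(domain_map.values())
-- ===== SOURCE B (Python) =====
-- def _earliest(group):
--     best = group[0]
--     for entry in group[1:]:
--         if entry[2] < best[2]:
--             best = entry
--     return best
--
--
-- def deduplicate_services(services):
--     groups = {}
--     for domain, subject, date in services:
--         groups.setdefault(domain, []).append((domain, subject, date))
--     return [_earliest(group) for group in groups.values()]
-- ===== Notes on version B (the rewrite author's own statement) =====
-- stated objective: alternative
-- what changed: B replaces A's inline compare-and-replace dict fold by a two-phase group-then-reduce: first bucket all tuples per domain with setdefault (first-appearance order), then select each group's first earliest-date entry with a separate reduction helper.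
import Mathlib
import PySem

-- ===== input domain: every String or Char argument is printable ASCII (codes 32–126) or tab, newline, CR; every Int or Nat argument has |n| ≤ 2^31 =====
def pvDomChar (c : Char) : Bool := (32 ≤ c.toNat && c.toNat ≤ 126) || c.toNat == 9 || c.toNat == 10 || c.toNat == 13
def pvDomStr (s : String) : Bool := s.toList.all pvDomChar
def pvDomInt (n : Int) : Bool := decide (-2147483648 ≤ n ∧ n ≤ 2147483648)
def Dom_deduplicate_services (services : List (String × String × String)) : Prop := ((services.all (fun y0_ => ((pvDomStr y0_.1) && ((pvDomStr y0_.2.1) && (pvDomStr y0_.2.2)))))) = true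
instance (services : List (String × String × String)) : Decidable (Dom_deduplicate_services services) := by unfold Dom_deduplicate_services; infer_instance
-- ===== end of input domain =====

-- B groups services per domain first, then reduces each group to its earliest-date entry;
-- A keeps a running best per domain inside one dict fold. Same return value on all inputs.
-- (A's try/except around the date comparison can never fire for string-typed dates, so B omits it.)

-- ===== PORT A =====
-- one loop iteration of A: insert if new domain, else replace when the new date is strictly earlier
def pvStepA (d : PySem.Dict String (String × String × String)) (t : String × String × String) :
    PySem.Dict String (String × String × String) :=
  if d.contains t.1 = false then
    d.insert t.1 t
  else
    let existing_date := (d.getD t.1 ("", "", "")).2.2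
    if t.2.2 < existing_date then d.insert t.1 t else d

def deduplicate_services (services : List (String × String × String)) : List (String × String × String) :=
  (services.foldl pvStepA PySem.Dict.empty).values

-- ===== PORT B =====
-- _earliest: best = group[0]; for entry in group[1:]: replace on strictly earlier date
-- (the [] case is group[0] on an empty group, which B never reaches: groups are built non-empty)
def pvEarliest (g : List (String × String × String)) : String × String × String :=
  match g with
  | [] => ("", "", "")
  | h :: tl => tl.foldl (fun best e => if e.2.2 < best.2.2 then e else best) h

def deduplicate_services_alt (services : List (String × String × String)) : List (String × String × String) :=
  let groups := services.foldl (fun d t => d.modify t.1 [] (· ++ [t])) PySem.Dict.empty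
  groups.values.map pvEarliest

-- ===== PRECONDITION & SPEC =====
def Spec_deduplicate_services (services : List (String × String × String)) (out : List (String × String × String)) : Prop := out = deduplicate_services_alt services
instance (services : List (String × String × String)) (out : List (String × String × String)) : Decidable (Spec_deduplicate_services services out) := by unfold Spec_deduplicate_services; infer_instance

-- ===== CLAIM (what is proved, stated in full; the proofs are below) =====
def Claim_equal_deduplicate_services : Prop := ∀ (services : List (String × String × String)), Dom_deduplicate_services services → Spec_deduplicate_services services (deduplicate_services services)

-- ===== LEMMAS AND PROOFS =====

-- reducing a group extended by one entry = compare the new date against the group's reduced entry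
lemma pvEarliest_append (g : List (String × String × String)) (t : String × String × String)
    (hg : g ≠ []) :
    pvEarliest (g ++ [t]) = if t.2.2 < (pvEarliest g).2.2 then t else pvEarliest g := by
  cases g with
  | nil => exact absurd rfl hg
  | cons h tl => simp [pvEarliest, List.foldl_append]

-- loop invariant: A's dict is the per-entry reduction of B's grouping dict
lemma pv_inv (l : List (String × String × String))
    (dA : PySem.Dict String (String × String × String))
    (dB : PySem.Dict String (List (String × String × String)))
    (hnd : dB.keys.Nodup)
    (hrel : dA.items = dB.items.map (fun p => (p.1, pvEarliest p.2)))
    (hne : ∀ p ∈ dB.items, p.2 ≠ []) :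
    (l.foldl pvStepA dA).items
      = (l.foldl (fun d t => d.modify t.1 [] (· ++ [t])) dB).items.map (fun p => (p.1, pvEarliest p.2)) := by
  induction l generalizing dA dB with
  | nil => simpa using hrel
  | cons t l ih =>
    have hkeys : dA.keys = dB.keys := by
      simp [PySem.Dict.keys, hrel, List.map_map, Function.comp]
    have hcont : dA.contains t.1 = dB.contains t.1 := by
      rw [PySem.Dict.contains_eq_decide_mem_keys, PySem.Dict.contains_eq_decide_mem_keys, hkeys]
    simp only [List.foldl_cons]
    by_cases hc : dB.contains t.1 = true
    · -- existing domain: B appends to the group, A compares dates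
      obtain ⟨g, hg⟩ : ∃ g, dB.get? t.1 = some g := by
        rw [PySem.Dict.contains_eq_isSome_get?] at hc
        exact Option.isSome_iff_exists.mp hc
      have hmem : (t.1, g) ∈ dB.items := (PySem.Dict.get?_eq_some_iff_mem_items dB t.1 g hnd).mp hg
      have hgD : dB.getD t.1 [] = g := PySem.Dict.getD_of_mem_items _ hmem hnd []
      have hgne : g ≠ [] := hne _ hmem
      have hndA : dA.keys.Nodup := by rw [hkeys]; exact hnd
      have hmemA : (t.1, pvEarliest g) ∈ dA.items := by
        rw [hrel]; exact List.mem_map_of_mem hmem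
      have hAD : dA.getD t.1 ("", "", "") = pvEarliest g :=
        PySem.Dict.getD_of_mem_items _ hmemA hndA _
      have hBstep : dB.modify t.1 [] (· ++ [t]) = dB.insert t.1 (g ++ [t]) := by
        simp [PySem.Dict.modify, hgD]
      have hkey_unique : ∀ p ∈ dB.items, p.1 = t.1 → p.2 = g := by
        intro p hp hp1
        have : dB.get? t.1 = some p.2 := by
          apply (PySem.Dict.get?_eq_some_iff_mem_items dB t.1 p.2 hnd).mpr
          rw [← hp1]; exact hp
        rw [hg] at this; exact (Option.some.injEq _ _).mp this.symm
      have hndB' : (dB.insert t.1 (g ++ [t])).keys.Nodup := by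
        rw [PySem.Dict.keys_insert_of_contains dB _ hc]; exact hnd
      have hne' : ∀ p ∈ (dB.insert t.1 (g ++ [t])).items, p.2 ≠ [] := by
        intro p hp
        rw [PySem.Dict.items_insert_of_contains dB _ hc] at hp
        obtain ⟨q, hq, hqp⟩ := List.mem_map.mp hp
        by_cases h1 : q.1 == t.1
        · simp [h1] at hqp; simp [← hqp]
        · simp [h1] at hqp; rw [← hqp]; exact hne _ hq
      have hrel' : ∀ (dA' : PySem.Dict String (String × String × String)), dA'.items = dA.items.map (fun q => if q.1 == t.1 then (t.1, pvEarliest (g ++ [t])) else q) →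
          dA'.items = (dB.insert t.1 (g ++ [t])).items.map (fun p => (p.1, pvEarliest p.2)) := by
        intro dA' h
        rw [h, hrel, PySem.Dict.items_insert_of_contains dB _ hc, List.map_map, List.map_map]
        apply List.map_congr_left
        intro p hp
        by_cases h1 : p.1 = t.1
        · have : p.2 = g := hkey_unique p hp h1
          simp [Function.comp, h1]
        · simp [Function.comp, h1]
      rw [hBstep]
      show (List.foldl pvStepA (pvStepA dA t) l).items = _
      unfold pvStepA
      rw [hcont, hc]
      simp only [Bool.true_eq_false, if_false, hAD]
      by_cases hlt : t.2.2 < (pvEarliest g).2.2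
      · rw [if_pos hlt]
        apply ih _ _ hndB' _ hne'
        apply hrel' _ ?_
        rw [PySem.Dict.items_insert_of_contains dA _ (by rw [hcont]; exact hc)]
        apply List.map_congr_left
        intro p hp
        by_cases h1 : p.1 = t.1
        · simp [h1, pvEarliest_append g t hgne, hlt]
        · simp [h1]
      · rw [if_neg hlt]
        apply ih _ _ hndB' _ hne'
        apply hrel' _ ?_
        rw [hrel, List.map_map]
        apply List.map_congr_left
        intro p hp
        by_cases h1 : p.1 = t.1
        · have h2 : p.2 = g := hkey_unique p hp h1
          simp [Function.comp, h1, h2, pvEarliest_append g t hgne, hlt]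
        · simp [Function.comp, h1]
    · -- new domain: both sides append one entry
      have hc' : dB.contains t.1 = false := by simpa using hc
      have hBstep : dB.modify t.1 [] (· ++ [t]) = dB.insert t.1 [t] := by
        simp [PySem.Dict.modify, PySem.Dict.getD_of_not_contains dB _ hc']
      have hnotmem : t.1 ∉ dB.keys := by
        rw [PySem.Dict.contains_eq_decide_mem_keys] at hc'
        simpa using hc'
      show (List.foldl pvStepA (pvStepA dA t) l).items = _
      unfold pvStepA
      rw [hcont, hc', if_pos rfl, hBstep]
      apply ih
      · rw [PySem.Dict.keys_insert_of_not_contains dB _ hc']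
        simp [List.nodup_append, hnd]
        exact fun a ha h => hnotmem (h ▸ ha)
      · rw [PySem.Dict.items_insert_of_not_contains dA _ (by rw [hcont]; exact hc'),
            PySem.Dict.items_insert_of_not_contains dB _ hc', hrel]
        simp [pvEarliest]
      · intro p hp
        rw [PySem.Dict.items_insert_of_not_contains dB _ hc'] at hp
        rcases List.mem_append.mp hp with h | h
        · exact hne _ h
        · simp at h; simp [h]

-- ===== VERDICT (by name: the statement is the Claim_ definition above) =====
theorem deduplicate_services_spec : Claim_equal_deduplicate_services := by
  intro services _
  show deduplicate_services services = deduplicate_services_alt services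
  unfold deduplicate_services deduplicate_services_alt
  have h := pv_inv services PySem.Dict.empty PySem.Dict.empty (by simp [PySem.Dict.keys, PySem.Dict.empty])
    (by simp [PySem.Dict.empty]) (by simp [PySem.Dict.empty])
  simp only [PySem.Dict.values, h, List.map_map]
  rfl
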